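-- pv_equiv track=rewrite | github.com/alemniscate/knighttour | knighttour6.py | knightmove
-- ===== SOURCE A (Python) =====
-- def countmoves(x, y, maxcol, maxrow, originx, originy, history):
--     possible_move = get_possible_move(x, y, maxcol, maxrow, history)
--     count = len(possible_move)
--     if (originx, originy) in possible_move:
--         count -= 1
--     return count
--
-- def get_possible_move(x, y, maxcol, maxrow, history):
--     temp_list = []
--     up2 = y + 2
--     dn2 = y - 2
--     left  = x - 1
--     right = x + 1
--     up = y + 1
--     dn = y - 1
--     left2  = x - 2
--     right2 = x + 2
--     temp_list.append((left, up2))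
--     temp_list.append((right, up2))
--     temp_list.append((left, dn2))
--     temp_list.append((right, dn2))
--     temp_list.append((left2, up))
--     temp_list.append((right2, up))
--     temp_list.append((left2, dn))
--     temp_list.append((right2, dn))
--     possible_move = []
--     for move in temp_list:
--         x, y = move
--         if 1 <= x <= maxcol and 1 <= y <= maxrow:
--             if move not in history:
--                 possible_move.append(move)
--
--     return possible_move
--
-- def knightmove(x, y, maxcol, maxrow, history):
--
--     if len(history) == maxcol * maxrow:
--         return True
--
--     possible_move = get_possible_move(x, y, maxcol, maxrow, history)
--     if len(possible_move) == 0: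
--         return False
--
--     movelist = []
--     for move in possible_move:
--         move_x, move_y = move
--         count = countmoves(move_x, move_y, maxcol, maxrow, x, y, history)
--         movelist.append([move_x, move_y, count])
--     movelist.sort(key=lambda t: -t[2])
--
--     for movec in movelist:
--         history.append((movec[0], movec[1]))
--         if knightmove(movec[0], movec[1], maxcol, maxrow, history):
--             return True
--         history.pop(-1)
--
--     return False
-- ===== SOURCE B (Python) =====
-- _DELTAS = [(-1, 2), (1, 2), (-1, -2), (1, -2), (-2, 1), (2, 1), (-2, -1), (2, -1)]
--
-- def _frame(x, y, maxcol, maxrow, history):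
--     moves = [(x + dx, y + dy) for dx, dy in _DELTAS
--              if 1 <= x + dx <= maxcol and 1 <= y + dy <= maxrow
--              and (x + dx, y + dy) not in history]
--
--     def degree(m):
--         mx, my = m
--         return sum(1 for dx, dy in _DELTAS
--                    if 1 <= mx + dx <= maxcol and 1 <= my + dy <= maxrow
--                    and (mx + dx, my + dy) not in history
--                    and (mx + dx, my + dy) != (x, y))
--
--     moves.sort(key=lambda m: -degree(m))
--     return moves
--
-- def knightmove(x, y, maxcol, maxrow, history):
--     if len(history) == maxcol * maxrow:
--         return True
--     stack = [_frame(x, y, maxcol, maxrow, history)]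
--     while stack:
--         top = stack[-1]
--         if not top:
--             stack.pop()
--             if stack:
--                 history.pop()
--             continue
--         mx, my = top.pop(0)
--         history.append((mx, my))
--         if len(history) == maxcol * maxrow:
--             return True
--         nxt = _frame(mx, my, maxcol, maxrow, history)
--         if nxt:
--             stack.append(nxt)
--         else:
--             history.pop()
--     return False
-- ===== Notes on version B (the rewrite author's own statement) =====
-- stated objective: alternative
-- what changed: The recursive Warnsdorff backtracking is replaced by an iterative DFS over an explicit stack of sorted move frames, and the per-square count helper (build candidate list, then subtract one if the origin is reachable) is replaced by a direct one-pass degree formula that excludes the origin while counting.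
import Mathlib
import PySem

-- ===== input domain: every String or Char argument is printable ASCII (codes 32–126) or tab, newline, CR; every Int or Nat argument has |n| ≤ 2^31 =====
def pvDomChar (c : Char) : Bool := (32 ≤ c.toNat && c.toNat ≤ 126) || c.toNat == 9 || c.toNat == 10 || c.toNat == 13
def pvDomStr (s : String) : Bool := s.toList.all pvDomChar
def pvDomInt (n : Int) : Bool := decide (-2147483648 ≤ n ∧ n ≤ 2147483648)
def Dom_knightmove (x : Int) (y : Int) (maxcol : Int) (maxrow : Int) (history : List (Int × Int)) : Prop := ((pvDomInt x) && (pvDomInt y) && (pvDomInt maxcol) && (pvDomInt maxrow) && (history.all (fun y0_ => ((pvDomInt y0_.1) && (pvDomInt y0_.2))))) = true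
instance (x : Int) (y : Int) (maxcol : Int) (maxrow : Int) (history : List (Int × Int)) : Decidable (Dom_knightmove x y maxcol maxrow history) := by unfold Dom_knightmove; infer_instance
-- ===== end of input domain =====

-- B replaces A's recursive backtracking by an iterative DFS over an explicit stack of
-- sorted move frames (same move order and Warnsdorff-style key, so the same search);
-- both versions mutate `history` in Python identically, and the proof is about the
-- returned Bool with `history` threaded as a value.

-- ===== PORT A =====
def getPossibleMove (x : Int) (y : Int) (maxcol : Int) (maxrow : Int) (history : List (Int × Int)) : List (Int × Int) :=
  let temp_list : List (Int × Int) :=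
    [(x - 1, y + 2), (x + 1, y + 2), (x - 1, y - 2), (x + 1, y - 2),
     (x - 2, y + 1), (x + 2, y + 1), (x - 2, y - 1), (x + 2, y - 1)]
  temp_list.foldl (fun acc m =>
    if 1 ≤ m.1 ∧ m.1 ≤ maxcol ∧ 1 ≤ m.2 ∧ m.2 ≤ maxrow then
      if m ∉ history then acc ++ [m] else acc
    else acc) []

def countmoves (x : Int) (y : Int) (maxcol : Int) (maxrow : Int) (originx : Int) (originy : Int) (history : List (Int × Int)) : Int :=
  let possible_move := getPossibleMove x y maxcol maxrow history
  let count : Int := possible_move.length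
  if (originx, originy) ∈ possible_move then count - 1 else count

-- termination machinery for the ports' recursions (not part of the algorithms):
-- the board squares, and the number of board squares not yet visited
def pvBoard (maxcol maxrow : Int) : List (Int × Int) :=
  (List.range maxcol.toNat).flatMap (fun (i : Nat) =>
    (List.range maxrow.toNat).map (fun (j : Nat) => ((i : Int) + 1, (j : Int) + 1)))

def pvFree (maxcol maxrow : Int) (h : List (Int × Int)) : Nat :=
  ((pvBoard maxcol maxrow).toFinset.filter (fun c => c ∉ h)).card

lemma pv_mem_board {maxcol maxrow : Int} {m : Int × Int} :
    m ∈ pvBoard maxcol maxrow ↔ (1 ≤ m.1 ∧ m.1 ≤ maxcol ∧ 1 ≤ m.2 ∧ m.2 ≤ maxrow) := by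
  obtain ⟨a, b⟩ := m
  rw [pvBoard, List.mem_flatMap]
  constructor
  · rintro ⟨i, hi, hm⟩
    rw [List.mem_map] at hm
    obtain ⟨j, hj, he⟩ := hm
    rw [List.mem_range] at hi hj
    injection he with h1 h2
    simp only []
    omega
  · rintro ⟨h1, h2, h3, h4⟩
    refine ⟨(a - 1).toNat, ?_, ?_⟩
    · rw [List.mem_range]; omega
    · rw [List.mem_map]
      refine ⟨(b - 1).toNat, ?_, ?_⟩
      · rw [List.mem_range]; omega
      · rw [Prod.mk.injEq]; constructor <;> omega

lemma pv_foldl_ifif {α : Type} (p q : α → Prop) [DecidablePred p] [DecidablePred q]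
    (l : List α) (acc : List α) :
    l.foldl (fun acc m => if p m then if q m then acc ++ [m] else acc else acc) acc
      = acc ++ l.filter (fun m => decide (p m ∧ q m)) := by
  induction l generalizing acc with
  | nil => simp
  | cons a l ih =>
    simp only [List.foldl_cons, List.filter_cons]
    by_cases hp : p a <;> by_cases hq : q a <;>
      simp [hp, hq, ih, List.append_assoc]

lemma pv_gpm_eq (x y maxcol maxrow : Int) (h : List (Int × Int)) :
    getPossibleMove x y maxcol maxrow h
      = ([(x - 1, y + 2), (x + 1, y + 2), (x - 1, y - 2), (x + 1, y - 2),
          (x - 2, y + 1), (x + 2, y + 1), (x - 2, y - 1), (x + 2, y - 1)] : List (Int × Int)).filter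
          (fun m => decide ((1 ≤ m.1 ∧ m.1 ≤ maxcol ∧ 1 ≤ m.2 ∧ m.2 ≤ maxrow) ∧ m ∉ h)) := by
  unfold getPossibleMove
  exact pv_foldl_ifif (fun m => 1 ≤ m.1 ∧ m.1 ≤ maxcol ∧ 1 ≤ m.2 ∧ m.2 ≤ maxrow)
    (fun m => m ∉ h) _ []

lemma pv_mem_gpm {x y maxcol maxrow : Int} {h : List (Int × Int)} {m : Int × Int}
    (hm : m ∈ getPossibleMove x y maxcol maxrow h) :
    (1 ≤ m.1 ∧ m.1 ≤ maxcol ∧ 1 ≤ m.2 ∧ m.2 ≤ maxrow) ∧ m ∉ h := by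
  rw [pv_gpm_eq] at hm
  have := List.of_mem_filter hm
  simpa using this

lemma pvFree_lt {maxcol maxrow : Int} {h : List (Int × Int)} {m : Int × Int}
    (hb : 1 ≤ m.1 ∧ m.1 ≤ maxcol ∧ 1 ≤ m.2 ∧ m.2 ≤ maxrow) (hnm : m ∉ h) :
    pvFree maxcol maxrow (h ++ [m]) < pvFree maxcol maxrow h := by
  apply Finset.card_lt_card
  constructor
  · intro c hc
    simp only [Finset.mem_filter] at hc ⊢
    exact ⟨hc.1, fun hch => hc.2 (by simp [hch])⟩
  · intro hsub
    have hmem : m ∈ (pvBoard maxcol maxrow).toFinset.filter (fun c => c ∉ h) := by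
      simp only [Finset.mem_filter, List.mem_toFinset]
      exact ⟨pv_mem_board.2 hb, hnm⟩
    have := hsub hmem
    simp only [Finset.mem_filter] at this
    exact this.2 (by simp)

def knightmove (x : Int) (y : Int) (maxcol : Int) (maxrow : Int) (history : List (Int × Int)) : Bool :=
  if (history.length : Int) = maxcol * maxrow then true
  else
    let possible_move := getPossibleMove x y maxcol maxrow history
    if possible_move.length = 0 then false
    else
      let movelist := possible_move.map
        (fun m => (m.1, m.2, countmoves m.1 m.2 maxcol maxrow x y history))
      let ml := PySem.List.sorted movelist (fun t => -t.2.2)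
      ml.attach.any (fun mc =>
        knightmove mc.1.1 mc.1.2.1 maxcol maxrow (history ++ [(mc.1.1, mc.1.2.1)]))
termination_by pvFree maxcol maxrow history
decreasing_by
  have hm := mc.2
  rw [PySem.List.mem_sorted] at hm
  obtain ⟨m, hmp, he⟩ := List.mem_map.1 hm
  have h1 : mc.1.1 = m.1 := by rw [← he]
  have h2 : mc.1.2.1 = m.2 := by rw [← he]
  have hv := pv_mem_gpm hmp
  rw [h1, h2]
  have : ((m.1, m.2) : Int × Int) = m := by ext <;> rfl
  rw [this]
  exact pvFree_lt hv.1 hv.2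

-- ===== PORT B =====
def deltas : List (Int × Int) := [(-1, 2), (1, 2), (-1, -2), (1, -2), (-2, 1), (2, 1), (-2, -1), (2, -1)]

def degree (x : Int) (y : Int) (maxcol : Int) (maxrow : Int) (history : List (Int × Int)) (m : Int × Int) : Int :=
  deltas.foldl (fun acc d =>
    if (1 ≤ m.1 + d.1 ∧ m.1 + d.1 ≤ maxcol ∧ 1 ≤ m.2 + d.2 ∧ m.2 + d.2 ≤ maxrow)
        ∧ (m.1 + d.1, m.2 + d.2) ∉ history ∧ (m.1 + d.1, m.2 + d.2) ≠ (x, y)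
    then acc + 1 else acc) 0

def frame (x : Int) (y : Int) (maxcol : Int) (maxrow : Int) (history : List (Int × Int)) : List (Int × Int) :=
  let moves := (deltas.map (fun d => (x + d.1, y + d.2))).filter
    (fun n => decide ((1 ≤ n.1 ∧ n.1 ≤ maxcol ∧ 1 ≤ n.2 ∧ n.2 ≤ maxrow) ∧ n ∉ history))
  PySem.List.sorted moves (fun m => -degree x y maxcol maxrow history m)

-- termination machinery for the stack loop (not part of the algorithm):
def stackW : List (List (Int × Int)) → Nat
  | [] => 0
  | f :: s => f.length + 9 * stackW s

lemma pv_frame_length_le (x y maxcol maxrow : Int) (h : List (Int × Int)) :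
    (frame x y maxcol maxrow h).length ≤ 8 := by
  unfold frame
  rw [PySem.List.length_sorted]
  have := List.length_filter_le
    (fun n : Int × Int => decide ((1 ≤ n.1 ∧ n.1 ≤ maxcol ∧ 1 ≤ n.2 ∧ n.2 ≤ maxrow) ∧ n ∉ h))
    (deltas.map (fun d => (x + d.1, y + d.2)))
  simpa [deltas] using this

lemma pvFree_dropLast_le (maxcol maxrow : Int) (h : List (Int × Int)) :
    pvFree maxcol maxrow h.dropLast ≤ pvFree maxcol maxrow h + 1 := by
  rcases eq_or_ne h [] with rfl | hne
  · simp
  · unfold pvFree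
    have hsub : ((pvBoard maxcol maxrow).toFinset.filter (fun c => c ∉ h.dropLast))
        ⊆ insert (h.getLast hne) ((pvBoard maxcol maxrow).toFinset.filter (fun c => c ∉ h)) := by
      intro c hc
      simp only [Finset.mem_filter] at hc
      by_cases hcl : c = h.getLast hne
      · simp [hcl]
      · have hch : c ∉ h := by
          intro hchm
          apply hc.2
          have hsplit := List.dropLast_append_getLast hne
          rw [← hsplit] at hchm
          rcases List.mem_append.1 hchm with h1 | h1
          · exact h1
          · simp at h1; exact absurd h1 hcl
        exact Finset.mem_insert_of_mem (Finset.mem_filter.2 ⟨hc.1, hch⟩)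
    calc _ ≤ _ := Finset.card_le_card hsub
      _ ≤ _ := Finset.card_insert_le _ _

lemma pv_lex_of_le {A B k l : Nat} (hle : A ≤ B) (hkl : k < l) :
    Prod.Lex (· < ·) (· < ·) (A, k) (B, l) := by
  rcases lt_or_eq_of_le hle with hlt | heq
  · exact Prod.Lex.left _ _ hlt
  · subst heq; exact Prod.Lex.right _ hkl

lemma pv_measure_push (μ' μ nl lms W : Nat) (hμ : μ' < μ) (hnl : nl ≤ 8) :
    9 ^ μ' * (nl + 9 * (lms + 9 * W)) < 9 ^ μ * (lms + 1 + 9 * W) := by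
  have h1 : μ' + 1 ≤ μ := hμ
  calc 9 ^ μ' * (nl + 9 * (lms + 9 * W))
      < 9 ^ μ' * (9 * (lms + 1 + 9 * W)) := by
        exact mul_lt_mul_of_pos_left (by omega) (pow_pos (by norm_num) _)
    _ = 9 ^ (μ' + 1) * (lms + 1 + 9 * W) := by ring
    _ ≤ 9 ^ μ * (lms + 1 + 9 * W) :=
        Nat.mul_le_mul_right _ (Nat.pow_le_pow_right (by norm_num) h1)

lemma pv_measure_push' (μ' μ : Nat) (nxt ms : List (Int × Int))
    (rest : List (List (Int × Int))) (m : Int × Int) (hμ : μ' < μ) (hnl : nxt.length ≤ 8) :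
    9 ^ μ' * stackW (nxt :: ms :: rest) < 9 ^ μ * stackW ((m :: ms) :: rest) := by
  simp only [stackW, List.length_cons]
  exact pv_measure_push μ' μ nxt.length ms.length (stackW rest) hμ hnl

lemma pv_measure_tail (μ : Nat) (m : Int × Int) (ms : List (Int × Int))
    (rest : List (List (Int × Int))) :
    9 ^ μ * stackW (ms :: rest) < 9 ^ μ * stackW ((m :: ms) :: rest) := by
  apply mul_lt_mul_of_pos_left ?_ (pow_pos (by norm_num) _)
  simp only [stackW, List.length_cons]
  omega

lemma pv_measure_pop (μ' μ : Nat) (r : List (Int × Int)) (rs : List (List (Int × Int)))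
    (hμ : μ' ≤ μ + 1) :
    9 ^ μ' * stackW (r :: rs) ≤ 9 ^ μ * stackW ([] :: r :: rs) := by
  calc 9 ^ μ' * stackW (r :: rs)
      ≤ 9 ^ (μ + 1) * stackW (r :: rs) :=
        Nat.mul_le_mul_right _ (Nat.pow_le_pow_right (by norm_num) hμ)
    _ = 9 ^ μ * stackW ([] :: r :: rs) := by simp [stackW]; ring

def bloop (maxcol : Int) (maxrow : Int) (stack : List (List (Int × Int))) (hist : List (Int × Int)) : Bool :=
  match stack with
  | [] => false
  | [] :: rest =>
    match rest with
    | [] => false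
    | r :: rs => bloop maxcol maxrow (r :: rs) hist.dropLast
  | (m :: ms) :: rest =>
    -- dependent-if totality guard: every move a frame ever holds is an on-board,
    -- unvisited square (see pv_frame_mem); it only feeds the termination measure
    if hg : (1 ≤ m.1 ∧ m.1 ≤ maxcol ∧ 1 ≤ m.2 ∧ m.2 ≤ maxrow) ∧ m ∉ hist then
      if ((hist ++ [m]).length : Int) = maxcol * maxrow then true
      else
        if frame m.1 m.2 maxcol maxrow (hist ++ [m]) ≠ [] then
          bloop maxcol maxrow (frame m.1 m.2 maxcol maxrow (hist ++ [m]) :: ms :: rest) (hist ++ [m])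
        else bloop maxcol maxrow (ms :: rest) hist
    else bloop maxcol maxrow (ms :: rest) hist
termination_by (9 ^ pvFree maxcol maxrow hist * stackW stack, stack.length)
decreasing_by
  · exact pv_lex_of_le
      (pv_measure_pop _ _ r rs (pvFree_dropLast_le maxcol maxrow hist)) (by simp)
  · exact Prod.Lex.left _ _
      (pv_measure_push' _ _ _ _ _ _ (pvFree_lt hg.1 hg.2)
        (pv_frame_length_le m.1 m.2 maxcol maxrow (hist ++ [m])))
  · exact Prod.Lex.left _ _ (pv_measure_tail _ m ms rest)
  · exact Prod.Lex.left _ _ (pv_measure_tail _ m ms rest)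

def knightmove_alt (x : Int) (y : Int) (maxcol : Int) (maxrow : Int) (history : List (Int × Int)) : Bool :=
  if (history.length : Int) = maxcol * maxrow then true
  else bloop maxcol maxrow [frame x y maxcol maxrow history] history

-- ===== PRECONDITION & SPEC =====
def Spec_knightmove (x : Int) (y : Int) (maxcol : Int) (maxrow : Int) (history : List (Int × Int)) (out : Bool) : Prop := out = knightmove_alt x y maxcol maxrow history
instance (x : Int) (y : Int) (maxcol : Int) (maxrow : Int) (history : List (Int × Int)) (out : Bool) : Decidable (Spec_knightmove x y maxcol maxrow history out) := by unfold Spec_knightmove; infer_instance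

-- ===== CLAIM (what is proved, stated in full; the proofs are below) =====
def Claim_equal_knightmove : Prop := ∀ (x : Int) (y : Int) (maxcol : Int) (maxrow : Int) (history : List (Int × Int)), Dom_knightmove x y maxcol maxrow history → Spec_knightmove x y maxcol maxrow history (knightmove x y maxcol maxrow history)

-- ===== LEMMAS AND PROOFS =====

-- A's inner for-loop over the sorted movelist, as a predicate on plain squares
def pvAany (maxcol maxrow : Int) (ms : List (Int × Int)) (h : List (Int × Int)) : Bool :=
  ms.any (fun m => knightmove m.1 m.2 maxcol maxrow (h ++ [m]))

lemma pvAany_nil (maxcol maxrow : Int) (h : List (Int × Int)) :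
    pvAany maxcol maxrow [] h = false := rfl

lemma pvAany_cons (maxcol maxrow : Int) (m : Int × Int) (ms h : List (Int × Int)) :
    pvAany maxcol maxrow (m :: ms) h
      = (knightmove m.1 m.2 maxcol maxrow (h ++ [m]) || pvAany maxcol maxrow ms h) := by
  simp [pvAany]

lemma pv_any_attach_proj (maxcol maxrow : Int) (h : List (Int × Int)) (L : List (Int × Int × Int)) :
    (L.attach.any fun mc => knightmove mc.1.1 mc.1.2.1 maxcol maxrow (h ++ [(mc.1.1, mc.1.2.1)]))
      = pvAany maxcol maxrow (L.map (fun t => (t.1, t.2.1))) h := by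
  have hiff : ((L.attach.any fun mc =>
        knightmove mc.1.1 mc.1.2.1 maxcol maxrow (h ++ [(mc.1.1, mc.1.2.1)])) = true)
      ↔ ((pvAany maxcol maxrow (L.map (fun t => (t.1, t.2.1))) h) = true) := by
    simp only [pvAany, List.any_eq_true, List.mem_attach, true_and, Subtype.exists,
      List.mem_map]
    constructor
    · rintro ⟨t, ht, hk⟩
      exact ⟨(t.1, t.2.1), ⟨t, ht, rfl⟩, hk⟩
    · rintro ⟨mm, ⟨t, ht, rfl⟩, hk⟩
      exact ⟨t, ht, hk⟩
  cases hL : (L.attach.any fun mc =>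
      knightmove mc.1.1 mc.1.2.1 maxcol maxrow (h ++ [(mc.1.1, mc.1.2.1)])) with
  | false =>
    cases hR : (pvAany maxcol maxrow (L.map (fun t => (t.1, t.2.1))) h) with
    | false => rfl
    | true => exact absurd (hiff.2 hR) (by simp [hL])
  | true => exact (hiff.1 hL).symm

lemma pv_insertBy_map {α β : Type} (g : α → β) (b : β → β → Bool) (x : α) (ys : List α) :
    PySem.List.insertBy b (g x) (ys.map g)
      = (PySem.List.insertBy (fun u v => b (g u) (g v)) x ys).map g := by
  induction ys with
  | nil => rfl
  | cons y ys ih =>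
    rw [List.map_cons]
    simp only [PySem.List.insertBy]
    by_cases hb : b (g x) (g y) = true <;> simp [hb, ih]

lemma pv_sorted_map {α β κ : Type} [LT κ] [DecidableLT κ] (g : α → β) (l : List α) (key : β → κ) :
    PySem.List.sorted (l.map g) key = (PySem.List.sorted l (fun a => key (g a))).map g := by
  rw [PySem.List.sorted_eq_foldl_insertBy, PySem.List.sorted_eq_foldl_insertBy]
  suffices hgen : ∀ acc : List α,
      (l.map g).foldl (fun acc x => PySem.List.insertBy (fun a c => decide (key a < key c)) x acc)
        (acc.map g)
      = (l.foldl (fun acc x =>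
          PySem.List.insertBy (fun a c => decide (key (g a) < key (g c))) x acc) acc).map g by
    simpa using hgen []
  induction l with
  | nil => intro acc; rfl
  | cons a l ih =>
    intro acc
    rw [List.map_cons, List.foldl_cons, List.foldl_cons, pv_insertBy_map]
    exact ih _

lemma pv_count_sub {α : Type} [DecidableEq α] (L : List α) (hnd : L.Nodup) (p : α → Bool) (o : α) :
    ((L.filter p).length : Int) - (if o ∈ L.filter p then 1 else 0)
      = ((L.filter (fun z => p z && decide (z ≠ o))).length : Int) := by
  induction hnd with
  | nil => simp
  | cons ha hnd ih =>
    rename_i a L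
    simp only [List.filter_cons]
    by_cases hp : p a = true
    · by_cases hao : a = o
      · subst hao
        have hoL : a ∉ L.filter p := fun hm => (ha a (List.mem_of_mem_filter hm)) rfl
        have hfeq : L.filter (fun z => p z && !decide (z = a)) = L.filter p := by
          apply List.filter_congr
          intro z hz
          simp [Ne.symm (ha z hz)]
        simp [hp, hoL, hfeq]
      · have hoa : ¬ o = a := fun he => hao he.symm
        have hd : decide (a ≠ o) = true := by simp [hao]
        by_cases ho : o ∈ L.filter p
        · simp only [ho, if_pos] at ih
          simp only [hp, hd, Bool.and_true, if_true, List.length_cons, List.mem_cons,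
            ho, or_true, if_pos]
          push_cast at ih ⊢
          omega
        · simp only [ho, if_neg, not_false_iff] at ih
          simp only [hp, hd, Bool.and_true, if_true, List.length_cons, List.mem_cons,
            ho, or_false, hoa, false_or, if_neg, not_false_iff]
          push_cast at ih ⊢
          omega
    · simp only [hp, Bool.false_eq_true, if_false]
      exact ih

lemma pv_temp_eq (a b : Int) :
    ([(a - 1, b + 2), (a + 1, b + 2), (a - 1, b - 2), (a + 1, b - 2),
      (a - 2, b + 1), (a + 2, b + 1), (a - 2, b - 1), (a + 2, b - 1)] : List (Int × Int))
      = deltas.map (fun d => (a + d.1, b + d.2)) := by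
  simp only [deltas, List.map_cons, List.map_nil, Prod.mk.injEq, List.cons.injEq, and_true]
  and_intros <;> simp [sub_eq_add_neg]

-- countmoves equals the direct degree formula
lemma pv_count_eq_degree (x y maxcol maxrow : Int) (h : List (Int × Int)) (m : Int × Int) :
    countmoves m.1 m.2 maxcol maxrow x y h = degree x y maxcol maxrow h m := by
  have hQ : degree x y maxcol maxrow h m
      = (List.countP (fun d : Int × Int => decide
          ((1 ≤ m.1 + d.1 ∧ m.1 + d.1 ≤ maxcol ∧ 1 ≤ m.2 + d.2 ∧ m.2 + d.2 ≤ maxrow)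
            ∧ (m.1 + d.1, m.2 + d.2) ∉ h ∧ (m.1 + d.1, m.2 + d.2) ≠ (x, y))) deltas : Int) := by
    unfold degree
    rw [show (fun (acc : Int) (d : Int × Int) =>
        if (1 ≤ m.1 + d.1 ∧ m.1 + d.1 ≤ maxcol ∧ 1 ≤ m.2 + d.2 ∧ m.2 + d.2 ≤ maxrow)
            ∧ (m.1 + d.1, m.2 + d.2) ∉ h ∧ (m.1 + d.1, m.2 + d.2) ≠ (x, y)
        then acc + 1 else acc)
      = (fun (acc : Int) (d : Int × Int) =>
          if (fun d : Int × Int => decide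
            ((1 ≤ m.1 + d.1 ∧ m.1 + d.1 ≤ maxcol ∧ 1 ≤ m.2 + d.2 ∧ m.2 + d.2 ≤ maxrow)
              ∧ (m.1 + d.1, m.2 + d.2) ∉ h ∧ (m.1 + d.1, m.2 + d.2) ≠ (x, y))) d = true
          then acc + 1 else acc) from by
        funext acc d
        simp only [decide_eq_true_eq]]
    rw [PySem.List.foldl_count_if]
    simp
  rw [hQ]
  have hnd : ((deltas.map (fun d => (m.1 + d.1, m.2 + d.2))) : List (Int × Int)).Nodup := by
    refine List.Nodup.map ?_ (by decide)
    intro d1 d2 he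
    rw [Prod.ext_iff] at he ⊢
    simp only [Prod.mk.injEq] at he
    omega
  have hpt : ((fun z : Int × Int =>
        decide ((1 ≤ z.1 ∧ z.1 ≤ maxcol ∧ 1 ≤ z.2 ∧ z.2 ≤ maxrow) ∧ z ∉ h)
          && decide (z ≠ (x, y))) ∘ (fun d : Int × Int => (m.1 + d.1, m.2 + d.2)))
      = (fun d : Int × Int => decide
          ((1 ≤ m.1 + d.1 ∧ m.1 + d.1 ≤ maxcol ∧ 1 ≤ m.2 + d.2 ∧ m.2 + d.2 ≤ maxrow)
            ∧ (m.1 + d.1, m.2 + d.2) ∉ h ∧ (m.1 + d.1, m.2 + d.2) ≠ (x, y))) := by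
    funext d
    simp only [Function.comp_apply]
    rw [← Bool.decide_and, decide_eq_decide]
    tauto
  have hT : (List.countP (fun d : Int × Int => decide
        ((1 ≤ m.1 + d.1 ∧ m.1 + d.1 ≤ maxcol ∧ 1 ≤ m.2 + d.2 ∧ m.2 + d.2 ≤ maxrow)
          ∧ (m.1 + d.1, m.2 + d.2) ∉ h ∧ (m.1 + d.1, m.2 + d.2) ≠ (x, y))) deltas)
      = ((deltas.map (fun d => (m.1 + d.1, m.2 + d.2))).filter
          (fun z : Int × Int =>
            decide ((1 ≤ z.1 ∧ z.1 ≤ maxcol ∧ 1 ≤ z.2 ∧ z.2 ≤ maxrow) ∧ z ∉ h)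
              && decide (z ≠ (x, y)))).length := by
    rw [← hpt, ← List.countP_map, List.countP_eq_length_filter]
  rw [hT]
  rw [← pv_count_sub _ hnd
    (fun z : Int × Int => decide ((1 ≤ z.1 ∧ z.1 ≤ maxcol ∧ 1 ≤ z.2 ∧ z.2 ≤ maxrow) ∧ z ∉ h))
    ((x, y) : Int × Int)]
  unfold countmoves
  rw [pv_gpm_eq, pv_temp_eq]
  dsimp only
  split_ifs with hm
  · rfl
  · simp

-- B: frame is A: sorted movelist with the count column dropped
lemma pv_frame_eq (x y maxcol maxrow : Int) (h : List (Int × Int)) :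
    frame x y maxcol maxrow h
      = PySem.List.sorted (getPossibleMove x y maxcol maxrow h)
          (fun m => -degree x y maxcol maxrow h m) := by
  unfold frame
  rw [← pv_temp_eq x y, ← pv_gpm_eq]

lemma pv_frame_mem {x y maxcol maxrow : Int} {h : List (Int × Int)} {m : Int × Int}
    (hm : m ∈ frame x y maxcol maxrow h) :
    (1 ≤ m.1 ∧ m.1 ≤ maxcol ∧ 1 ≤ m.2 ∧ m.2 ≤ maxrow) ∧ m ∉ h := by
  rw [pv_frame_eq, PySem.List.mem_sorted] at hm
  exact pv_mem_gpm hm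

-- one unfolding of A, phrased through B's frame
lemma pv_knightmove_node (x y maxcol maxrow : Int) (h : List (Int × Int)) :
    knightmove x y maxcol maxrow h
      = if (h.length : Int) = maxcol * maxrow then true
        else pvAany maxcol maxrow (frame x y maxcol maxrow h) h := by
  rw [knightmove]
  by_cases hc : (h.length : Int) = maxcol * maxrow
  · rw [if_pos hc, if_pos hc]
  · rw [if_neg hc, if_neg hc]
    by_cases hp : getPossibleMove x y maxcol maxrow h = []
    · have hfr : frame x y maxcol maxrow h = [] := by
        rw [pv_frame_eq, PySem.List.sorted_eq_nil_iff]
        exact hp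
      simp [hp, hfr, pvAany]
    · have hlen : ¬ ((getPossibleMove x y maxcol maxrow h).length = 0) := by
        simpa [List.length_eq_zero_iff] using hp
      simp only [hlen, if_false]
      rw [pv_frame_eq]
      have hsm : (PySem.List.sorted ((getPossibleMove x y maxcol maxrow h).map
            (fun m => (m.1, m.2, countmoves m.1 m.2 maxcol maxrow x y h)))
            (fun t => -t.2.2)).map (fun t => (t.1, t.2.1))
          = PySem.List.sorted (getPossibleMove x y maxcol maxrow h)
              (fun m => -degree x y maxcol maxrow h m) := by
        rw [pv_sorted_map]
        rw [List.map_map]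
        have h1 : ((fun t : Int × Int × Int => (t.1, t.2.1))
            ∘ (fun m : Int × Int => (m.1, m.2, countmoves m.1 m.2 maxcol maxrow x y h)))
            = id := by funext mm; simp
        rw [h1, List.map_id]
        congr 1
        funext mm
        simp only []
        rw [pv_count_eq_degree]
      rw [← hsm]
      exact pv_any_attach_proj maxcol maxrow h _

lemma pv_bloop_nil (maxcol maxrow : Int) (h : List (Int × Int)) (rest : List (List (Int × Int))) :
    bloop maxcol maxrow ([] :: rest) h
      = match rest with
        | [] => false
        | _ :: _ => bloop maxcol maxrow rest h.dropLast := by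
  cases rest with
  | nil => simp only [bloop]
  | cons r rs => simp only [bloop]

-- the stack loop runs A's for-loop for the top frame, then pops
lemma pv_master (maxcol maxrow : Int) :
    ∀ (k : Nat) (ms : List (Int × Int)) (h : List (Int × Int)) (rest : List (List (Int × Int))),
      9 * pvFree maxcol maxrow h + ms.length ≤ k →
      (∀ m ∈ ms, (1 ≤ m.1 ∧ m.1 ≤ maxcol ∧ 1 ≤ m.2 ∧ m.2 ≤ maxrow) ∧ m ∉ h) →
      bloop maxcol maxrow (ms :: rest) h
        = if pvAany maxcol maxrow ms h then true
          else match rest with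
            | [] => false
            | _ :: _ => bloop maxcol maxrow rest h.dropLast := by
  intro k
  induction k with
  | zero =>
    intro ms h rest hk hv
    have hms : ms = [] := List.length_eq_zero_iff.1 (by omega)
    subst hms
    rw [pv_bloop_nil]
    rw [pvAany_nil]
    simp
  | succ k ih =>
    intro ms h rest hk hv
    cases ms with
    | nil =>
      rw [pv_bloop_nil]
      rw [pvAany_nil]
      simp
    | cons m ms' =>
      simp only [List.length_cons] at hk
      have hgm := hv m List.mem_cons_self
      have hvt : ∀ mm ∈ ms', (1 ≤ mm.1 ∧ mm.1 ≤ maxcol ∧ 1 ≤ mm.2 ∧ mm.2 ≤ maxrow) ∧ mm ∉ h :=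
        fun mm hm => hv mm (List.mem_cons_of_mem _ hm)
      rw [bloop]
      rw [dif_pos hgm]
      by_cases hc : (((h ++ [m]).length : Int) = maxcol * maxrow)
      · rw [if_pos hc]
        have hk1 : knightmove m.1 m.2 maxcol maxrow (h ++ [m]) = true := by
          rw [pv_knightmove_node, if_pos hc]
        have hany : pvAany maxcol maxrow (m :: ms') h = true := by
          rw [pvAany_cons, hk1, Bool.true_or]
        rw [hany, if_pos rfl]
      · rw [if_neg hc]
        have hA : knightmove m.1 m.2 maxcol maxrow (h ++ [m])
            = pvAany maxcol maxrow (frame m.1 m.2 maxcol maxrow (h ++ [m])) (h ++ [m]) := by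
          rw [pv_knightmove_node, if_neg hc]
        have hμ : pvFree maxcol maxrow (h ++ [m]) < pvFree maxcol maxrow h :=
          pvFree_lt hgm.1 hgm.2
        by_cases hne : frame m.1 m.2 maxcol maxrow (h ++ [m]) ≠ []
        · rw [if_pos hne]
          rw [ih (frame m.1 m.2 maxcol maxrow (h ++ [m])) (h ++ [m]) (ms' :: rest)
            (by have := pv_frame_length_le m.1 m.2 maxcol maxrow (h ++ [m]); omega)
            (fun mm hm => pv_frame_mem hm)]
          by_cases hb : pvAany maxcol maxrow (frame m.1 m.2 maxcol maxrow (h ++ [m])) (h ++ [m]) = true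
          · rw [if_pos hb]
            have hany : pvAany maxcol maxrow (m :: ms') h = true := by
              rw [pvAany_cons, hA, hb, Bool.true_or]
            rw [hany, if_pos rfl]
          · have hbf : pvAany maxcol maxrow (frame m.1 m.2 maxcol maxrow (h ++ [m])) (h ++ [m]) = false :=
              eq_false_of_ne_true hb
            rw [if_neg hb]
            simp only [List.dropLast_concat]
            rw [ih ms' h rest (by omega) hvt]
            have hany : pvAany maxcol maxrow (m :: ms') h = pvAany maxcol maxrow ms' h := by
              rw [pvAany_cons, hA, hbf, Bool.false_or]
            rw [hany]
        · rw [if_neg hne]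
          have hnil : frame m.1 m.2 maxcol maxrow (h ++ [m]) = [] := not_ne_iff.1 hne
          rw [ih ms' h rest (by omega) hvt]
          have hany : pvAany maxcol maxrow (m :: ms') h = pvAany maxcol maxrow ms' h := by
            rw [pvAany_cons, hA, hnil, pvAany_nil, Bool.false_or]
          rw [hany]

-- ===== VERDICT (by name: the statement is the Claim_ definition above) =====
theorem knightmove_spec : Claim_equal_knightmove := by
  intro x y maxcol maxrow history _
  unfold Spec_knightmove knightmove_alt
  rw [pv_knightmove_node]
  by_cases hc : (history.length : Int) = maxcol * maxrow
  · simp [hc]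
  · simp only [hc, if_false]
    rw [pv_master maxcol maxrow (9 * pvFree maxcol maxrow history + 8)
      (frame x y maxcol maxrow history) history []
      (by have := pv_frame_length_le x y maxcol maxrow history; omega)
      (fun m hm => pv_frame_mem hm)]
    cases pvAany maxcol maxrow (frame x y maxcol maxrow history) history <;> simp
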